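-- pv_equiv track=rewrite | github.com/viyx/arc-search | search/lgg.py | lgg_dict
-- ===== SOURCE A (Python) =====
-- VAR = "VAR"
--
-- def lgg_dict(data: list[dict]) -> dict:
--     first = data[0].copy()
--     for d in data:
--         for k in first:
--             if first[k] == d[k] and d[k] != VAR:
--                 continue
--             first[k] = VAR
--     return first
-- ===== SOURCE B (Python) =====
-- VAR = "VAR"
--
-- def lgg_dict(data: list[dict]) -> dict:
--     # stage 1: build a hash-set index of the distinct values seen in each column
--     cols = {k: set() for k in data[0]}
--     for d in data:
--         for k in cols:
--             cols[k].add(d[k])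
--     # stage 2: a column generalizes to its sole value iff it collapsed to a non-VAR singleton
--     return {k: s.pop() if len(s) == 1 and VAR not in s else VAR for k, s in cols.items()}
-- ===== Notes on version B (the rewrite author's own statement) =====
-- stated objective: alternative
-- what changed: B runs two staged passes over a hash-set index: it first collects the set of distinct values of each column of the dicts, then decides each key by a set-cardinality test (sole non-VAR element iff the set is a non-VAR singleton), instead of A's single pass that mutates a copy of data[0] by re-comparing each dict against the running entry.
import Mathlib
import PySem

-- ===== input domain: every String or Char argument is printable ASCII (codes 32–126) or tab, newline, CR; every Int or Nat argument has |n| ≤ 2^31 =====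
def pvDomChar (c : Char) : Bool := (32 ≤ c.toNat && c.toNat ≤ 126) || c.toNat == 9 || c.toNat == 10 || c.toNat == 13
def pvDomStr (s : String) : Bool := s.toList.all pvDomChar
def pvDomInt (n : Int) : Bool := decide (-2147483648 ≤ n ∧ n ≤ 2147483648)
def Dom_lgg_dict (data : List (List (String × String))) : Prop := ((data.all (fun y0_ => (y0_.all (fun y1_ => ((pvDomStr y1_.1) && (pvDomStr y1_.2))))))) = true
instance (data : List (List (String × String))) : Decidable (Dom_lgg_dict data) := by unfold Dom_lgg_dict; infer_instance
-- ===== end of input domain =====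

-- B replaces A's mutate-a-copy equality scan by two staged passes over a hash-set index
-- (distinct values per column, then a cardinality test); objective: alternative.

-- the module constant VAR = "VAR"
def lggVAR : String := "VAR"

-- ===== PORT A =====
-- one outer-loop iteration of A: for k in first: if first[k] == d[k] and d[k] != VAR: continue; first[k] = VAR
-- (d[k] on a missing key is Python's KeyError; ported as getD with default "", those inputs are excluded by Pre_)
def lggStepA (f : PySem.Dict String String) (dl : List (String × String)) : PySem.Dict String String :=
  let d := PySem.Dict.ofList dl
  f.keys.foldl (fun g k =>
    if g.getD k "" == d.getD k "" && d.getD k "" != lggVAR then g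
    else g.insert k lggVAR) f

def lgg_dict (data : List (List (String × String))) : List (String × String) :=
  match data with
  | [] => []          -- data[0] raises IndexError here; excluded by Pre_
  | h0 :: _ =>
    (data.foldl lggStepA (PySem.Dict.ofList h0)).items

-- ===== PORT B =====
-- stage 1 inner step: for k in cols: cols[k].add(d[k])
-- (d[k] ported as getD with default "", as in port A; Pre_ excludes the missing-key inputs)
def lggColsAdd (c : PySem.Dict String (PySem.Set String)) (dl : List (String × String)) : PySem.Dict String (PySem.Set String) :=
  let d := PySem.Dict.ofList dl
  c.keys.foldl (fun c' k => c'.modify k PySem.Set.empty (fun s => PySem.Set.add s (d.getD k ""))) c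

def lgg_dict_alt (data : List (List (String × String))) : List (String × String) :=
  match data with
  | [] => []          -- data[0] raises IndexError here; excluded by Pre_
  | h0 :: _ =>
    -- cols = {k: set() for k in data[0]}
    let cols0 := (PySem.Dict.ofList h0).keys.foldl
      (fun c k => c.insert k PySem.Set.empty) (PySem.Dict.empty : PySem.Dict String (PySem.Set String))
    -- for d in data: for k in cols: cols[k].add(d[k])
    let cols := data.foldl lggColsAdd cols0
    -- {k: s.pop() if len(s) == 1 and VAR not in s else VAR for k, s in cols.items()}
    -- (s.pop() is only taken on a singleton set, where it returns the sole element = s.headD "")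
    (cols.items.foldl (fun r p =>
        r.insert p.1 (if PySem.Set.len p.2 == 1 && !(PySem.Set.contains p.2 lggVAR)
                      then p.2.headD "" else lggVAR))
      PySem.Dict.empty).items

-- ===== PRECONDITION & SPEC =====
-- Pre_ excludes exactly the inputs where the Python A raises: data = [] (IndexError on data[0]),
-- and a dict of data missing some key of data[0] (KeyError on d[k]).
def Pre_lgg_dict (data : List (List (String × String))) : Prop :=
  data ≠ [] ∧ ∀ dl ∈ data, ∀ kv ∈ data.headD [], kv.1 ∈ dl.map Prod.fst
instance (data : List (List (String × String))) : Decidable (Pre_lgg_dict data) := by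
  unfold Pre_lgg_dict; infer_instance

def pvWitness_lgg_dict : (List (List (String × String))) :=
  [[("a", "1"), ("b", "VAR")], [("a", "1"), ("b", "2")]]

def Spec_lgg_dict (data : List (List (String × String))) (out : List (String × String)) : Prop := out = lgg_dict_alt data
instance (data : List (List (String × String))) (out : List (String × String)) : Decidable (Spec_lgg_dict data out) := by unfold Spec_lgg_dict; infer_instance

-- ===== CLAIM (what is proved, stated in full; the proofs are below) =====
def Claim_equal_lgg_dict : Prop := ∀ (data : List (List (String × String))), Dom_lgg_dict data → Pre_lgg_dict data → Spec_lgg_dict data (lgg_dict data)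

-- ===== LEMMAS AND PROOFS =====

-- ---- A-side characterization ----

theorem lgg_inner_keys (d : PySem.Dict String String) (ks : List String)
    (f : PySem.Dict String String) (h : ∀ k ∈ ks, k ∈ f.keys) :
    (ks.foldl (fun g k =>
      if g.getD k "" == d.getD k "" && d.getD k "" != lggVAR then g
      else g.insert k lggVAR) f).keys = f.keys := by
  induction ks generalizing f with
  | nil => rfl
  | cons k0 ks ih =>
    have hc : f.contains k0 = true := (PySem.Dict.contains_iff_mem_keys f k0).mpr (h k0 (by simp))
    have hkeys : (if f.getD k0 "" == d.getD k0 "" && d.getD k0 "" != lggVAR then f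
        else f.insert k0 lggVAR).keys = f.keys := by
      split
      · rfl
      · exact PySem.Dict.keys_insert_of_contains f lggVAR hc
    rw [List.foldl_cons, ih _ (by intro k hk; rw [hkeys]; exact h k (by simp [hk])), hkeys]

theorem lgg_inner_getD (d : PySem.Dict String String) (ks : List String) (hnd : ks.Nodup)
    (f : PySem.Dict String String) (h : ∀ k ∈ ks, k ∈ f.keys) (k : String) :
    (ks.foldl (fun g k =>
      if g.getD k "" == d.getD k "" && d.getD k "" != lggVAR then g
      else g.insert k lggVAR) f).getD k "" =
    if k ∈ ks then
      (if f.getD k "" == d.getD k "" && d.getD k "" != lggVAR then f.getD k "" else lggVAR)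
    else f.getD k "" := by
  induction ks generalizing f with
  | nil => simp
  | cons k0 ks ih =>
    have hc : f.contains k0 = true := (PySem.Dict.contains_iff_mem_keys f k0).mpr (h k0 (by simp))
    set f' := (if f.getD k0 "" == d.getD k0 "" && d.getD k0 "" != lggVAR then f
        else f.insert k0 lggVAR) with hf'
    have hkeys : f'.keys = f.keys := by
      rw [hf']; split
      · rfl
      · exact PySem.Dict.keys_insert_of_contains f lggVAR hc
    have hgetne : ∀ j, j ≠ k0 → f'.getD j "" = f.getD j "" := by
      intro j hj
      rw [hf']; split
      · rfl
      · rw [PySem.Dict.getD_insert]; simp [hj]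
    have hget0 : f'.getD k0 "" =
        (if f.getD k0 "" == d.getD k0 "" && d.getD k0 "" != lggVAR then f.getD k0 "" else lggVAR) := by
      rw [hf']; split
      · simp_all
      · rw [PySem.Dict.getD_insert]; simp
    have hnd' : ks.Nodup := hnd.of_cons
    have h0 : k0 ∉ ks := (List.nodup_cons.mp hnd).1
    rw [List.foldl_cons, ih hnd' f' (by intro j hj; rw [hkeys]; exact h j (by simp [hj]))]
    by_cases hk : k = k0
    · subst hk
      simp [h0, hget0]
    · rw [hgetne k hk]
      by_cases hks : k ∈ ks <;> simp [hks, hk]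

theorem lgg_stepA_keys (f : PySem.Dict String String) (dl : List (String × String)) :
    (lggStepA f dl).keys = f.keys :=
  lgg_inner_keys _ _ _ (fun _ hk => hk)

theorem lgg_outer_keys (ds : List (List (String × String))) (f : PySem.Dict String String) :
    (ds.foldl lggStepA f).keys = f.keys := by
  induction ds generalizing f with
  | nil => rfl
  | cons dl ds ih => rw [List.foldl_cons, ih, lgg_stepA_keys]

theorem lgg_stepA_getD (f : PySem.Dict String String) (dl : List (String × String))
    (hnd : f.keys.Nodup) (k : String) (hk : k ∈ f.keys) :
    (lggStepA f dl).getD k "" =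
    if f.getD k "" == (PySem.Dict.ofList dl).getD k "" && (PySem.Dict.ofList dl).getD k "" != lggVAR
    then f.getD k "" else lggVAR := by
  unfold lggStepA
  rw [lgg_inner_getD _ _ hnd f (fun _ hk => hk) k]
  simp [hk]

theorem lgg_outer_getD (ds : List (List (String × String))) (f : PySem.Dict String String)
    (hnd : f.keys.Nodup) (k : String) (hk : k ∈ f.keys) :
    (ds.foldl lggStepA f).getD k "" =
    if ds.all (fun dl => (PySem.Dict.ofList dl).getD k "" == f.getD k "" && f.getD k "" != lggVAR)
    then f.getD k "" else lggVAR := by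
  induction ds generalizing f with
  | nil => simp
  | cons dl ds ih =>
    rw [List.foldl_cons,
      ih (lggStepA f dl) (by rw [lgg_stepA_keys]; exact hnd) (by rw [lgg_stepA_keys]; exact hk),
      lgg_stepA_getD f dl hnd k hk, List.all_cons]
    set c := f.getD k "" with hc
    set dk := (PySem.Dict.ofList dl).getD k "" with hdk
    by_cases hP : (c == dk && dk != lggVAR) = true
    · have h1 : c = dk := beq_iff_eq.mp ((Bool.and_eq_true _ _).mp hP).1
      have h2 : (dk != lggVAR) = true := ((Bool.and_eq_true _ _).mp hP).2
      simp [h1, h2]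
    · have hP' : (c == dk && dk != lggVAR) = false := by simpa using hP
      have hcond2 : (dk == c && c != lggVAR) = false := by
        by_cases he : c = dk
        · rw [he] at hP' ⊢; exact hP'
        · simp [Ne.symm he]
      rw [hP']
      simp [hcond2]

-- ---- B-side characterization ----

theorem cols_inner_keys (d : PySem.Dict String String) (ks : List String)
    (c : PySem.Dict String (PySem.Set String)) (h : ∀ k ∈ ks, k ∈ c.keys) :
    (ks.foldl (fun c' k => c'.modify k PySem.Set.empty
        (fun s => PySem.Set.add s (d.getD k ""))) c).keys = c.keys := by
  induction ks generalizing c with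
  | nil => rfl
  | cons k0 ks ih =>
    have hc : c.contains k0 = true := (PySem.Dict.contains_iff_mem_keys c k0).mpr (h k0 (by simp))
    have hkeys : (c.modify k0 PySem.Set.empty (fun s => PySem.Set.add s (d.getD k0 ""))).keys = c.keys := by
      rw [PySem.Dict.keys_modify, PySem.Dict.keys_insert_of_contains _ _ hc]
    rw [List.foldl_cons, ih _ (by intro k hk; rw [hkeys]; exact h k (by simp [hk])), hkeys]

theorem cols_inner_getD (d : PySem.Dict String String) (ks : List String) (hnd : ks.Nodup)
    (c : PySem.Dict String (PySem.Set String)) (h : ∀ k ∈ ks, k ∈ c.keys) (k : String) :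
    (ks.foldl (fun c' k => c'.modify k PySem.Set.empty
        (fun s => PySem.Set.add s (d.getD k ""))) c).getD k PySem.Set.empty =
    if k ∈ ks then PySem.Set.add (c.getD k PySem.Set.empty) (d.getD k "")
    else c.getD k PySem.Set.empty := by
  induction ks generalizing c with
  | nil => simp
  | cons k0 ks ih =>
    set c' := c.modify k0 PySem.Set.empty (fun s => PySem.Set.add s (d.getD k0 "")) with hc'
    have hcont : c.contains k0 = true := (PySem.Dict.contains_iff_mem_keys c k0).mpr (h k0 (by simp))
    have hkeys : c'.keys = c.keys := by
      rw [hc', PySem.Dict.keys_modify, PySem.Dict.keys_insert_of_contains _ _ hcont]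
    have hget : ∀ j, c'.getD j PySem.Set.empty =
        if j = k0 then PySem.Set.add (c.getD k0 PySem.Set.empty) (d.getD k0 "")
        else c.getD j PySem.Set.empty := by
      intro j; rw [hc', PySem.Dict.getD_modify]
    have hnd' : ks.Nodup := hnd.of_cons
    have h0 : k0 ∉ ks := (List.nodup_cons.mp hnd).1
    rw [List.foldl_cons, ih hnd' c' (by intro j hj; rw [hkeys]; exact h j (by simp [hj]))]
    by_cases hk : k = k0
    · subst hk
      simp only [List.mem_cons, true_or, if_true, if_neg h0]
      simpa using hget k
    · rw [hget k]
      by_cases hks : k ∈ ks <;> simp [hks, hk]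

theorem colsAdd_keys (c : PySem.Dict String (PySem.Set String)) (dl : List (String × String)) :
    (lggColsAdd c dl).keys = c.keys :=
  cols_inner_keys _ _ _ (fun _ hk => hk)

theorem cols_outer_keys (ds : List (List (String × String))) (c : PySem.Dict String (PySem.Set String)) :
    (ds.foldl lggColsAdd c).keys = c.keys := by
  induction ds generalizing c with
  | nil => rfl
  | cons dl ds ih => rw [List.foldl_cons, ih, colsAdd_keys]

theorem colsAdd_getD (c : PySem.Dict String (PySem.Set String)) (dl : List (String × String))
    (hnd : c.keys.Nodup) (k : String) (hk : k ∈ c.keys) :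
    (lggColsAdd c dl).getD k PySem.Set.empty =
    PySem.Set.add (c.getD k PySem.Set.empty) ((PySem.Dict.ofList dl).getD k "") := by
  unfold lggColsAdd
  rw [cols_inner_getD _ _ hnd c (fun _ hk => hk) k]
  simp [hk]

theorem cols_outer_getD (ds : List (List (String × String))) (c : PySem.Dict String (PySem.Set String))
    (hnd : c.keys.Nodup) (k : String) (hk : k ∈ c.keys) :
    (ds.foldl lggColsAdd c).getD k PySem.Set.empty =
    ds.foldl (fun s dl => PySem.Set.add s ((PySem.Dict.ofList dl).getD k ""))
      (c.getD k PySem.Set.empty) := by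
  induction ds generalizing c with
  | nil => rfl
  | cons dl ds ih =>
    rw [List.foldl_cons, List.foldl_cons,
      ih (lggColsAdd c dl) (by rw [colsAdd_keys]; exact hnd) (by rw [colsAdd_keys]; exact hk),
      colsAdd_getD c dl hnd k hk]

-- per-key value agreement: A's running-comparison result = B's set-cardinality result
theorem lgg_val_key (c : String) (tail : List String) :
    (if (c :: tail).all (fun v => v == c && c != lggVAR) then c else lggVAR) =
    (if PySem.Set.len (PySem.Set.ofList (c :: tail)) == 1 &&
        !(PySem.Set.contains (PySem.Set.ofList (c :: tail)) lggVAR)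
     then (PySem.Set.ofList (c :: tail)).headD "" else lggVAR) := by
  by_cases hall : ∀ v ∈ tail, v = c
  · have hdis : (PySem.Set.ofList tail).discard c = [] := by
      refine List.eq_nil_iff_forall_not_mem.mpr (fun x hx => ?_)
      obtain ⟨hx1, hx2⟩ := (PySem.Set.mem_discard _ _ _).mp hx
      exact hx2 (hall x ((PySem.Set.mem_ofList _ _).mp hx1))
    have hS : PySem.Set.ofList (c :: tail) = [c] := by
      rw [PySem.Set.ofList_cons, hdis]
    rw [hS]
    have hA : ((c :: tail).all (fun v => v == c && c != lggVAR)) = (c != lggVAR) := by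
      by_cases hc : c = lggVAR
      · subst hc; simp
      · have hb : (c != lggVAR) = true := bne_iff_ne.mpr hc
        rw [hb]
        refine List.all_eq_true.mpr (fun v hv => ?_)
        have hvc : v = c := by
          rcases List.mem_cons.mp hv with hv' | hv'
          · exact hv'
          · exact hall v hv'
        simp [hvc]
    rw [hA]
    by_cases hc : c = lggVAR
    · subst hc; decide
    · have hc' : lggVAR ≠ c := fun h => hc h.symm
      simp [PySem.Set.len, PySem.Set.contains, hc, hc']
  · have hex : ∃ v ∈ tail, v ≠ c := by
      by_contra h
      exact hall (fun v hv => by by_contra hne; exact h ⟨v, hv, hne⟩)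
    obtain ⟨v, hv, hne⟩ := hex
    have hA : ((c :: tail).all (fun v => v == c && c != lggVAR)) = false := by
      refine Bool.eq_false_iff.mpr (fun h => ?_)
      have := (List.all_eq_true.mp h) v (by simp [hv])
      exact hne (beq_iff_eq.mp ((Bool.and_eq_true _ _).mp this).1)
    have hB : (PySem.Set.len (PySem.Set.ofList (c :: tail)) == 1) = false := by
      refine Bool.eq_false_iff.mpr (fun h => ?_)
      have hlen : (PySem.Set.ofList (c :: tail)).length = 1 := by
        have : PySem.Set.len (PySem.Set.ofList (c :: tail)) = 1 := by
          exact beq_iff_eq.mp h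
        simpa [PySem.Set.len] using this
      obtain ⟨x, hx⟩ := List.length_eq_one_iff.mp hlen
      have hcx : c = x := by
        have : c ∈ PySem.Set.ofList (c :: tail) := (PySem.Set.mem_ofList _ _).mpr (by simp)
        simpa [hx] using this
      have hvx : v = x := by
        have : v ∈ PySem.Set.ofList (c :: tail) := (PySem.Set.mem_ofList _ _).mpr (by simp [hv])
        simpa [hx] using this
      exact hne (hvx.trans hcx.symm)
    rw [hA, hB]
    simp

-- the whole-input equality for nonempty data
theorem lgg_main (h0 : List (String × String)) (rest : List (List (String × String))) :
    lgg_dict (h0 :: rest) = lgg_dict_alt (h0 :: rest) := by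
  set first := PySem.Dict.ofList h0 with hfirst
  have hnd : first.keys.Nodup := PySem.Dict.nodup_keys_ofList h0
  set cols0 := (first.keys.foldl (fun c k => c.insert k PySem.Set.empty)
      (PySem.Dict.empty : PySem.Dict String (PySem.Set String))) with hcols0
  set cols := ((h0 :: rest).foldl lggColsAdd cols0) with hcols
  have e1 : lgg_dict (h0 :: rest) = ((h0 :: rest).foldl lggStepA first).items := rfl
  have e2 : lgg_dict_alt (h0 :: rest) =
      (cols.items.foldl (fun r p =>
        r.insert p.1 (if PySem.Set.len p.2 == 1 && !(PySem.Set.contains p.2 lggVAR)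
                      then p.2.headD "" else lggVAR))
      PySem.Dict.empty).items := rfl
  rw [e1, e2]
  -- A's items
  have hfk : ((h0 :: rest).foldl lggStepA first).keys = first.keys := lgg_outer_keys _ _
  rw [PySem.Dict.items_eq_map_keys _ (by rw [hfk]; exact hnd) "", hfk]
  -- cols0
  have hcols0_items : cols0.items = first.keys.map (fun k => (k, PySem.Set.empty)) := by
    rw [hcols0]
    have := PySem.Dict.items_foldl_insert_fresh first.keys (fun a => a)
      (fun _ => (PySem.Set.empty : PySem.Set String)) PySem.Dict.empty
      (fun a _ => by simp [PySem.Dict.contains_empty]) (by simpa using hnd)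
    simpa using this
  have hcols0_keys : cols0.keys = first.keys := by
    simp only [PySem.Dict.keys, hcols0_items]
    simp
  have hcols0_getD : ∀ k ∈ first.keys, cols0.getD k PySem.Set.empty = PySem.Set.empty := by
    intro k hk
    exact PySem.Dict.getD_of_mem_items cols0
      (by rw [hcols0_items]; exact List.mem_map.mpr ⟨k, hk, rfl⟩)
      (by rw [hcols0_keys]; exact hnd) _
  -- cols
  have hcols_keys : cols.keys = first.keys := by rw [hcols, cols_outer_keys, hcols0_keys]
  have hcols_getD : ∀ k ∈ first.keys, cols.getD k PySem.Set.empty =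
      PySem.Set.ofList ((h0 :: rest).map (fun dl => (PySem.Dict.ofList dl).getD k "")) := by
    intro k hk
    rw [hcols, cols_outer_getD _ _ (by rw [hcols0_keys]; exact hnd) k (by rw [hcols0_keys]; exact hk),
      hcols0_getD k hk, ← PySem.Set.update_map_eq_foldl_add, PySem.Set.update_empty]
  have hcols_items : cols.items = first.keys.map (fun k => (k, cols.getD k PySem.Set.empty)) := by
    rw [PySem.Dict.items_eq_map_keys cols (by rw [hcols_keys]; exact hnd) PySem.Set.empty, hcols_keys]
  -- final fold of B appends fresh keys
  rw [PySem.Dict.items_foldl_insert_fresh cols.items (fun p => p.1)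
    (fun p => (if PySem.Set.len p.2 == 1 && !(PySem.Set.contains p.2 lggVAR)
               then p.2.headD "" else lggVAR)) PySem.Dict.empty
    (fun a _ => by simp [PySem.Dict.contains_empty])
    (by rw [show cols.items.map (fun p => p.1) = cols.keys from rfl, hcols_keys]; exact hnd)]
  simp only [PySem.Dict.empty, List.nil_append]
  rw [hcols_items, List.map_map]
  apply List.map_congr_left
  intro k hk
  simp only [Function.comp]
  congr 1
  rw [lgg_outer_getD (h0 :: rest) first hnd k hk, hcols_getD k hk]
  have hmap : (h0 :: rest).map (fun dl => (PySem.Dict.ofList dl).getD k "") =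
      first.getD k "" :: rest.map (fun dl => (PySem.Dict.ofList dl).getD k "") := by
    rw [List.map_cons, hfirst]
  have hall : ((h0 :: rest).all
      (fun dl => (PySem.Dict.ofList dl).getD k "" == first.getD k "" && first.getD k "" != lggVAR)) =
      ((first.getD k "" :: rest.map (fun dl => (PySem.Dict.ofList dl).getD k "")).all
        (fun v => v == first.getD k "" && first.getD k "" != lggVAR)) := by
    rw [← hmap, List.all_map]
    rfl
  rw [hall, hmap]
  exact lgg_val_key (first.getD k "") (rest.map (fun dl => (PySem.Dict.ofList dl).getD k ""))

-- ===== VERDICT (by name: the statement is the Claim_ definition above) =====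
theorem lgg_dict_spec : Claim_equal_lgg_dict := by
  intro data _ _
  unfold Spec_lgg_dict
  cases data with
  | nil => rfl
  | cons h0 rest => exact lgg_main h0 rest
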